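-- pv_equiv track=rewrite | github.com/narpfel/adventofcode | 2022/25/solution.py | part_1
-- ===== SOURCE A (Python) =====
-- SNAFU_DIGIT_VALUES = {"2": 2, "1": 1, "0": 0, "-": -1, "=": -2}
--
-- DIGIT_VALUE_TO_SNAFU = {snafu_digit: value for value, snafu_digit in SNAFU_DIGIT_VALUES.items()}
--
-- def part_1(snafu_numbers):
--     fuel_requirement = sum(
--         SNAFU_DIGIT_VALUES[digit] * 5 ** i
--         for number in snafu_numbers
--         for i, digit in enumerate(reversed(number))
--     )
--
--     snafu_digits = []
--     while fuel_requirement: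
--         fuel_requirement, digit = divmod(fuel_requirement, 5)
--         if digit >= 3:
--             digit -= 5
--             fuel_requirement += 1
--         snafu_digits.append(DIGIT_VALUE_TO_SNAFU[digit])
--
--     return "".join(reversed(snafu_digits))
-- ===== SOURCE B (Python) =====
-- SNAFU_DIGIT_VALUES = {"2": 2, "1": 1, "0": 0, "-": -1, "=": -2}
--
-- DIGIT_VALUE_TO_SNAFU = {snafu_digit: value for value, snafu_digit in SNAFU_DIGIT_VALUES.items()}
--
--
-- def _add_snafu(xs, ys):
--     """Add two little-endian balanced-base-5 digit lists with carry propagation."""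
--     out = []
--     carry = 0
--     for i in range(max(len(xs), len(ys))):
--         s = (xs[i] if i < len(xs) else 0) + (ys[i] if i < len(ys) else 0) + carry
--         if s > 2:
--             s -= 5
--             carry = 1
--         elif s < -2:
--             s += 5
--             carry = -1
--         else:
--             carry = 0
--         out.append(s)
--     if carry:
--         out.append(carry)
--     return out
--
--
-- def part_1(snafu_numbers):
--     # add the numbers digitwise in SNAFU form; never convert to a plain integer
--     total = []
--     for number in snafu_numbers:
--         total = _add_snafu(total, [SNAFU_DIGIT_VALUES[c] for c in reversed(number)])
--     while total and total[-1] == 0: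
--         total.pop()
--     return "".join(DIGIT_VALUE_TO_SNAFU[d] for d in reversed(total))
-- ===== Notes on version B (the rewrite author's own statement) =====
-- stated objective: alternative
-- what changed: B never converts to a plain integer: it adds the SNAFU numbers directly as little-endian balanced-base-5 digit lists with digitwise carry propagation, then strips leading zeros, replacing A's integer power-sum followed by a divmod re-encoding loop.
import Mathlib
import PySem

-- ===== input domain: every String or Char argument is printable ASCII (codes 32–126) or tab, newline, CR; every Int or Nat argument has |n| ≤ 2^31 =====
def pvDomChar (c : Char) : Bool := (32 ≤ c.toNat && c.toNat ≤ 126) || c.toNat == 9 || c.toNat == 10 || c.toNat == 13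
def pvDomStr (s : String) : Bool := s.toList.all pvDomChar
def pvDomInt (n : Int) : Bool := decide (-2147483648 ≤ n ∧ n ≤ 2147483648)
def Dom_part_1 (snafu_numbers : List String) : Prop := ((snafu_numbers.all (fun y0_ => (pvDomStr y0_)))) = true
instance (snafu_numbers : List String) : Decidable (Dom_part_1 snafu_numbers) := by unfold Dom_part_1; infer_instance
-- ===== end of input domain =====

-- B adds the SNAFU numbers digitwise as balanced-base-5 digit lists with carries (never converting
-- to an integer), instead of A's integer power-sum plus divmod re-encoding; an alternative algorithm.


-- ===== PORT A =====
def SNAFU_DIGIT_VALUES : PySem.Dict Char Int :=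
  PySem.Dict.ofList [('2', 2), ('1', 1), ('0', 0), ('-', -1), ('=', -2)]

def DIGIT_VALUE_TO_SNAFU : PySem.Dict Int Char :=
  PySem.Dict.ofList [(2, '2'), (1, '1'), (0, '0'), (-1, '-'), (-2, '=')]

-- the while loop: fuel, digit = divmod(fuel, 5); carry fix-up when digit >= 3; append the char
def part_1_loop (fuel : Int) (digits : List Char) : List Char :=
  if fuel = 0 then digits
  else
    part_1_loop
      (if PySem.Int.mod fuel 5 ≥ 3 then PySem.Int.floordiv fuel 5 + 1 else PySem.Int.floordiv fuel 5)
      (digits ++ [DIGIT_VALUE_TO_SNAFU.getD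
        (if PySem.Int.mod fuel 5 ≥ 3 then PySem.Int.mod fuel 5 - 5 else PySem.Int.mod fuel 5) ' '])
termination_by fuel.natAbs
decreasing_by
  rw [PySem.Int.floordiv_eq_ediv_of_pos (by omega), PySem.Int.mod_eq_emod_of_pos (by omega)]
  split <;> omega

def part_1 (snafu_numbers : List String) : String :=
  let fuel_requirement :=
    snafu_numbers.foldl (fun acc number =>
      (PySem.List.enumerate number.toList.reverse).foldl
        (fun a p => a + SNAFU_DIGIT_VALUES.getD p.2 0 * 5 ^ p.1.toNat) acc) 0
  String.ofList (part_1_loop fuel_requirement []).reverse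

-- ===== PORT B =====
-- _add_snafu: index loop over max(len xs, len ys) with padding, ported as simultaneous recursion
def addSnafu : List Int → List Int → Int → List Int
  | [], [], c => if c = 0 then [] else [c]
  | x :: xt, [], c =>
    let s := x + 0 + c
    if s > 2 then (s - 5) :: addSnafu xt [] 1
    else if s < -2 then (s + 5) :: addSnafu xt [] (-1)
    else s :: addSnafu xt [] 0
  | [], y :: yt, c =>
    let s := 0 + y + c
    if s > 2 then (s - 5) :: addSnafu [] yt 1
    else if s < -2 then (s + 5) :: addSnafu [] yt (-1)
    else s :: addSnafu [] yt 0
  | x :: xt, y :: yt, c =>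
    let s := x + y + c
    if s > 2 then (s - 5) :: addSnafu xt yt 1
    else if s < -2 then (s + 5) :: addSnafu xt yt (-1)
    else s :: addSnafu xt yt 0

-- while total and total[-1] == 0: total.pop()
def stripZeros (t : List Int) : List Int :=
  if t ≠ [] ∧ t.getLastD 1 = 0 then stripZeros t.dropLast else t
termination_by t.length
decreasing_by
  rename_i h
  have ht : t ≠ [] := h.1
  have : 0 < t.length := List.length_pos_iff.mpr ht
  simp only [List.length_dropLast]
  omega

def part_1_alt (snafu_numbers : List String) : String :=
  let total :=
    snafu_numbers.foldl (fun total number =>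
      addSnafu total (number.toList.reverse.map (fun c => SNAFU_DIGIT_VALUES.getD c 0)) 0) []
  String.ofList ((stripZeros total).reverse.map (fun d => DIGIT_VALUE_TO_SNAFU.getD d ' '))

-- ===== PRECONDITION & SPEC =====
-- Pre_ excludes exactly the inputs on which Python A raises KeyError: a character that is
-- not one of the five SNAFU digits (B raises there too).
def Pre_part_1 (snafu_numbers : List String) : Prop :=
  (snafu_numbers.all (fun s => s.toList.all (fun c => ['2', '1', '0', '-', '='].contains c))) = true
instance (snafu_numbers : List String) : Decidable (Pre_part_1 snafu_numbers) := by
  unfold Pre_part_1; infer_instance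
def pvWitness_part_1 : List String := ["1=", "12", "", "2=-01"]

def Spec_part_1 (snafu_numbers : List String) (out : String) : Prop := out = part_1_alt snafu_numbers
instance (snafu_numbers : List String) (out : String) : Decidable (Spec_part_1 snafu_numbers out) := by unfold Spec_part_1; infer_instance

-- ===== CLAIM (what is proved, stated in full; the proofs are below) =====
def Claim_equal_part_1 : Prop := ∀ (snafu_numbers : List String), Dom_part_1 snafu_numbers → Pre_part_1 snafu_numbers → Spec_part_1 snafu_numbers (part_1 snafu_numbers)

-- ===== LEMMAS AND PROOFS =====

-- value of a little-endian balanced-base-5 digit list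
def snafuVal : List Int → Int
  | [] => 0
  | d :: t => d + 5 * snafuVal t

lemma snafuVal_append (xs : List Int) (d : Int) :
    snafuVal (xs ++ [d]) = snafuVal xs + d * 5 ^ xs.length := by
  induction xs with
  | nil => simp [snafuVal]
  | cons a t ih => simp [snafuVal, ih]; ring

-- every looked-up digit value is in [-2, 2] (default 0 included)
lemma digit_range (c : Char) :
    -2 ≤ SNAFU_DIGIT_VALUES.getD c 0 ∧ SNAFU_DIGIT_VALUES.getD c 0 ≤ 2 := by
  have hit : SNAFU_DIGIT_VALUES.items = [('2', 2), ('1', 1), ('0', 0), ('-', -1), ('=', -2)] := by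
    decide
  simp only [PySem.Dict.getD, PySem.Dict.get?, hit]
  cases hf : List.find? (fun p => p.1 == c) [('2', 2), ('1', 1), ('0', 0), ('-', -1), ('=', -2)] with
  | none => simp
  | some p =>
    have hm := List.mem_of_find?_eq_some hf
    fin_cases hm <;> simp

-- A's reversed-enumerate power sum over a digit-char list equals the snafuVal of its mapped digits
lemma powsum_eq_snafuVal (l : List Char) (s : Nat) (acc : Int) :
    (PySem.List.enumerate l (s : Int)).foldl
        (fun a p => a + SNAFU_DIGIT_VALUES.getD p.2 0 * 5 ^ p.1.toNat) acc
      = acc + 5 ^ s * snafuVal (l.map (fun c => SNAFU_DIGIT_VALUES.getD c 0)) := by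
  induction l generalizing s acc with
  | nil => simp [PySem.List.enumerate_nil, snafuVal]
  | cons c t ih =>
    rw [PySem.List.enumerate_cons, List.foldl_cons]
    have : ((s : Int) + 1) = ((s + 1 : Nat) : Int) := by push_cast; ring
    rw [this, ih]
    simp [snafuVal, Int.toNat_natCast]
    ring

-- digitwise addition computes the sum of the values
lemma addSnafu_val (xs ys : List Int) (c : Int) :
    snafuVal (addSnafu xs ys c) = snafuVal xs + snafuVal ys + c := by
  fun_induction addSnafu xs ys c <;> simp_all [snafuVal] <;> omega

-- digitwise addition keeps digits in [-2, 2] when the carry is in [-1, 1]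
lemma addSnafu_range (xs ys : List Int) (c : Int)
    (hx : ∀ d ∈ xs, -2 ≤ d ∧ d ≤ 2) (hy : ∀ d ∈ ys, -2 ≤ d ∧ d ≤ 2)
    (hc : -1 ≤ c ∧ c ≤ 1) :
    ∀ d ∈ addSnafu xs ys c, -2 ≤ d ∧ d ≤ 2 := by
  fun_induction addSnafu xs ys c <;> simp_all <;> omega

-- stripZeros preserves the value
lemma stripZeros_val (t : List Int) : snafuVal (stripZeros t) = snafuVal t := by
  fun_induction stripZeros t with
  | case1 t h ih =>
    obtain ⟨hne, hz⟩ := h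
    rw [ih]
    conv_rhs => rw [← List.dropLast_concat_getLast hne]
    rw [snafuVal_append]
    have : t.getLast hne = 0 := by
      rw [List.getLastD_eq_getLast?, List.getLast?_eq_some_getLast hne] at hz
      simpa using hz
    simp [this]
  | case2 => rfl

-- stripZeros preserves the digit range
lemma stripZeros_range (t : List Int) (h : ∀ d ∈ t, -2 ≤ d ∧ d ≤ 2) :
    ∀ d ∈ stripZeros t, -2 ≤ d ∧ d ≤ 2 := by
  fun_induction stripZeros t with
  | case1 t hc ih =>
    exact ih (fun d hd => h d (List.mem_of_mem_dropLast hd))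
  | case2 => exact h

-- stripZeros ends with a nonzero digit (or is empty)
lemma stripZeros_canonical (t : List Int) : stripZeros t ≠ [] → (stripZeros t).getLast? ≠ some 0 := by
  fun_induction stripZeros t with
  | case1 t hc ih => exact ih
  | case2 t hc =>
    intro hne hlast
    apply hc
    refine ⟨hne, ?_⟩
    rw [List.getLastD_eq_getLast?, hlast]
    rfl

-- a nonempty canonical digit list has nonzero value
lemma snafuVal_ne_zero (ds : List Int) (hr : ∀ d ∈ ds, -2 ≤ d ∧ d ≤ 2)
    (hne : ds ≠ []) (hc : ds.getLast? ≠ some 0) : snafuVal ds ≠ 0 := by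
  induction ds with
  | nil => exact absurd rfl hne
  | cons d t ih =>
    cases t with
    | nil =>
      simp [snafuVal]
      intro h
      apply hc
      simp [h]
    | cons e u =>
      have hlast : (d :: e :: u).getLast? = (e :: u).getLast? := List.getLast?_cons_cons
      have hv : snafuVal (e :: u) ≠ 0 := by
        apply ih (fun x hx => hr x (List.mem_cons_of_mem d hx)) (by simp)
        rw [← hlast]; exact hc
      have hd := hr d (by simp)
      have hv2 : snafuVal (d :: e :: u) = d + 5 * snafuVal (e :: u) := rfl
      omega

-- A's conversion loop, applied to the value of a canonical digit list, prints exactly its digits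
lemma loop_canonical (ds : List Int) (acc : List Char)
    (hr : ∀ d ∈ ds, -2 ≤ d ∧ d ≤ 2) (hc : ds ≠ [] → ds.getLast? ≠ some 0) :
    part_1_loop (snafuVal ds) acc
      = acc ++ ds.map (fun d => DIGIT_VALUE_TO_SNAFU.getD d ' ') := by
  induction ds generalizing acc with
  | nil => rw [part_1_loop]; simp [snafuVal]
  | cons d t ih =>
    have hd := hr d (by simp)
    have hfuel : snafuVal (d :: t) ≠ 0 := by
      apply snafuVal_ne_zero _ hr (by simp) (hc (by simp))
    have htail : t ≠ [] → t.getLast? ≠ some 0 := by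
      intro htne
      cases t with
      | nil => exact absurd rfl htne
      | cons e u =>
        rw [← List.getLast?_cons_cons (a := d)]
        exact hc (by simp)
    rw [part_1_loop, if_neg hfuel]
    rw [PySem.Int.mod_eq_emod_of_pos (by omega), PySem.Int.floordiv_eq_ediv_of_pos (by omega)]
    have hval : snafuVal (d :: t) = d + 5 * snafuVal t := rfl
    have hdig : (if snafuVal (d :: t) % 5 ≥ 3 then snafuVal (d :: t) % 5 - 5
        else snafuVal (d :: t) % 5) = d := by
      split <;> omega
    have hq : (if snafuVal (d :: t) % 5 ≥ 3 then snafuVal (d :: t) / 5 + 1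
        else snafuVal (d :: t) / 5) = snafuVal t := by
      split <;> omega
    rw [hdig, hq, ih (acc ++ [DIGIT_VALUE_TO_SNAFU.getD d ' ']) (fun x hx => hr x (List.mem_cons_of_mem d hx)) htail]
    simp

-- A's summation fold equals acc plus the sum of per-number values
lemma foldA_eq (xs : List String) (acc : Int) :
    xs.foldl (fun acc number =>
        (PySem.List.enumerate number.toList.reverse).foldl
          (fun a p => a + SNAFU_DIGIT_VALUES.getD p.2 0 * 5 ^ p.1.toNat) acc) acc
      = acc + (xs.map (fun n =>
          snafuVal (n.toList.reverse.map (fun c => SNAFU_DIGIT_VALUES.getD c 0)))).sum := by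
  induction xs generalizing acc with
  | nil => simp
  | cons n t ih =>
    simp only [List.foldl_cons, List.map_cons, List.sum_cons]
    have := powsum_eq_snafuVal n.toList.reverse 0 acc
    simp only [Nat.cast_zero, pow_zero, one_mul] at this
    rw [this, ih]
    ring

-- B's fold: value of the running total
lemma foldB_val (xs : List String) (tl : List Int) :
    snafuVal (xs.foldl (fun total number =>
        addSnafu total (number.toList.reverse.map (fun c => SNAFU_DIGIT_VALUES.getD c 0)) 0) tl)
      = snafuVal tl + (xs.map (fun n =>
          snafuVal (n.toList.reverse.map (fun c => SNAFU_DIGIT_VALUES.getD c 0)))).sum := by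
  induction xs generalizing tl with
  | nil => simp
  | cons n t ih =>
    simp only [List.foldl_cons, List.map_cons, List.sum_cons]
    rw [ih, addSnafu_val]
    ring

-- B's fold: the running total keeps digits in [-2, 2]
lemma foldB_range (xs : List String) (tl : List Int) (h : ∀ d ∈ tl, -2 ≤ d ∧ d ≤ 2) :
    ∀ d ∈ xs.foldl (fun total number =>
        addSnafu total (number.toList.reverse.map (fun c => SNAFU_DIGIT_VALUES.getD c 0)) 0) tl,
      -2 ≤ d ∧ d ≤ 2 := by
  induction xs generalizing tl with
  | nil => exact h
  | cons n t ih =>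
    simp only [List.foldl_cons]
    apply ih
    apply addSnafu_range _ _ _ h _ (by omega)
    intro d hd
    obtain ⟨c, _, rfl⟩ := List.mem_map.mp hd
    exact digit_range c

-- ===== VERDICT (by name: the statement is the Claim_ definition above) =====
theorem part_1_spec : Claim_equal_part_1 := by
  intro xs _ _
  unfold Spec_part_1 part_1 part_1_alt
  set total := xs.foldl (fun total number =>
      addSnafu total (number.toList.reverse.map (fun c => SNAFU_DIGIT_VALUES.getD c 0)) 0) []
    with htotal
  have hrange : ∀ d ∈ stripZeros total, -2 ≤ d ∧ d ≤ 2 :=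
    stripZeros_range total (foldB_range xs [] (by simp))
  have hfuel : xs.foldl (fun acc number =>
      (PySem.List.enumerate number.toList.reverse).foldl
        (fun a p => a + SNAFU_DIGIT_VALUES.getD p.2 0 * 5 ^ p.1.toNat) acc) 0
      = snafuVal (stripZeros total) := by
    rw [foldA_eq, stripZeros_val, htotal, foldB_val]
    simp [snafuVal]
  simp only [hfuel]
  rw [loop_canonical _ _ hrange (fun h => stripZeros_canonical total h)]
  simp [List.map_reverse]
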